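-- pv_equiv track=rewrite | github.com/RawRapter/python-vscode | ProgPracFol/Miscellaneous Programs/NoHasConec0s.py | toK
-- ===== SOURCE A (Python) =====
-- def toK(N, K):
--
-- 	# Weight of each digit
-- 	w = 1
-- 	s = 0
-- 	while (N != 0):
-- 		r = N % K
-- 		N = N//K
-- 		s = r * w + s
-- 		w *= 10
-- 	return s
-- ===== SOURCE B (Python) =====
-- def toK(N, K):
--     # Stage 1: extract base-K digits, least significant first.
--     digits = []
--     while N != 0:
--         digits.append(N % K)
--         N = N // K
--     # Stage 2: fold the digits most-significant-first with Horner's rule in base 10.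
--     s = 0
--     for d in reversed(digits):
--         s = s * 10 + d
--     return s
-- ===== Notes on version B (the rewrite author's own statement) =====
-- stated objective: alternative
-- what changed: Splits A's single accumulator loop (tracking a running weight w) into two staged passes: first collect the base-K digits into a list, then fold them most-significant-first by Horner's rule (s = s*10 + d), removing the weight variable entirely.
import Mathlib
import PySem

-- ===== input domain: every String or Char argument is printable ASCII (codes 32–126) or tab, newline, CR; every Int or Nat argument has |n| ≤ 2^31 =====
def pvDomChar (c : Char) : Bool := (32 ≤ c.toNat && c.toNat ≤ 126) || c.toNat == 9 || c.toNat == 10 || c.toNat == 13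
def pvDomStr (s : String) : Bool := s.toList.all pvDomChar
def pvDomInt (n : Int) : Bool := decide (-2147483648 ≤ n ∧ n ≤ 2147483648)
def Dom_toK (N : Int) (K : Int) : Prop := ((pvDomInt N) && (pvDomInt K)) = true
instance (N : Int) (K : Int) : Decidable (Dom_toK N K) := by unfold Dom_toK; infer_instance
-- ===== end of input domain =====

-- B replaces A's single weighted-accumulator loop by two staged passes (collect the
-- base-K digit list, then a Horner fold over it back-to-front); same cost, no weight variable.

-- ===== PORT A =====
-- A's while-loop over state (N, w, s); the fuel 100 only bounds the (≤ ~40) iterations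
-- any input admitted by Pre_toK performs — it never changes the computed value there.
def toKLoop (fuel : Nat) (N : Int) (K : Int) (w : Int) (s : Int) : Int :=
  match fuel with
  | 0 => s
  | fuel + 1 =>
    if N ≠ 0 then
      toKLoop fuel (PySem.Int.floordiv N K) K (w * 10) (PySem.Int.mod N K * w + s)
    else s

def toK (N : Int) (K : Int) : Int := toKLoop 100 N K 1 0

-- ===== PORT B =====
-- B's stage 1: collect the base-K digits, least significant first (fuel as above).
def toKDigits (fuel : Nat) (N : Int) (K : Int) : List Int :=
  match fuel with
  | 0 => []
  | fuel + 1 =>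
    if N ≠ 0 then
      PySem.Int.mod N K :: toKDigits fuel (PySem.Int.floordiv N K) K
    else []

-- B's stage 2: Horner fold in base 10 over the reversed digit list.
def toK_alt (N : Int) (K : Int) : Int :=
  (toKDigits 100 N K).reverse.foldl (fun s d => s * 10 + d) 0

-- ===== PRECONDITION & SPEC =====
-- Pre_ excludes exactly the inputs on which Python A does not return: K = 0 raises
-- ZeroDivisionError (unless N = 0, where the loop never divides), and the loop diverges
-- for |K| ≤ 1 with N ≠ 0 and for N < 0 with K ≥ 2.
def Pre_toK (N : Int) (K : Int) : Prop := K ≤ -2 ∨ (2 ≤ K ∧ 0 ≤ N) ∨ N = 0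
instance (N : Int) (K : Int) : Decidable (Pre_toK N K) := by unfold Pre_toK; infer_instance
def pvWitness_toK : Int × Int := (37, 5)

def Spec_toK (N : Int) (K : Int) (out : Int) : Prop := out = toK_alt N K
instance (N : Int) (K : Int) (out : Int) : Decidable (Spec_toK N K out) := by unfold Spec_toK; infer_instance

-- ===== CLAIM (what is proved, stated in full; the proofs are below) =====
def Claim_equal_toK : Prop := ∀ (N : Int) (K : Int), Dom_toK N K → Pre_toK N K → Spec_toK N K (toK N K)

-- ===== LEMMAS AND PROOFS =====
-- Horner fold of (ds ++ [d]) peels the last digit: fold(ds)*10 + d.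
theorem horner_append (ds : List Int) (d : Int) :
    (ds ++ [d]).foldl (fun s x => s * 10 + x) 0 = ds.foldl (fun s x => s * 10 + x) 0 * 10 + d := by
  simp [List.foldl_append]

-- A's loop equals the Horner fold of B's digit list, weighted by w, plus s.
theorem toKLoop_eq_digits (fuel : Nat) : ∀ (N K w s : Int),
    toKLoop fuel N K w s = (toKDigits fuel N K).reverse.foldl (fun a d => a * 10 + d) 0 * w + s := by
  induction fuel with
  | zero => intro N K w s; simp [toKLoop, toKDigits]
  | succ f ih =>
    intro N K w s
    by_cases h : N = 0
    · simp [toKLoop, toKDigits, h]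
    · simp only [toKLoop, toKDigits, h, ne_eq, not_false_iff, if_true, List.reverse_cons]
      rw [ih, horner_append]
      ring

-- ===== VERDICT (by name: the statement is the Claim_ definition above) =====
theorem toK_spec : Claim_equal_toK := by
  intro N K _ _
  unfold Spec_toK toK toK_alt
  rw [toKLoop_eq_digits]
  ring
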